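-- pv_equiv track=rewrite | github.com/raidora/bootdev-ssg | src/conversions.py | map_into_zones
-- ===== SOURCE A (Python) =====
-- text_zone = 0
--
-- delim_zone = 1
--
-- def map_into_zones(text, delimiter):
--     text_classification = []
--     delim_zone_buffer = 0
--     in_delim_zone = False
--
--     for idx, char in enumerate(text):
--         chunk = text[idx:idx + len(delimiter)]
--
--         if delim_zone_buffer > 0:
--             delim_zone_buffer -= 1
--             if delim_zone_buffer == 0:
--                 in_delim_zone = False
--
--         if chunk == delimiter and in_delim_zone:
--             delim_zone_buffer = len(delimiter)
--         elif chunk == delimiter and not in_delim_zone: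
--             in_delim_zone = True
--
--         if in_delim_zone or delim_zone_buffer > 0:
--             text_classification.append((char, delim_zone))
--         else:
--             text_classification.append((char, text_zone))
--
--     return text_classification
-- ===== SOURCE B (Python) =====
-- text_zone = 0
--
-- delim_zone = 1
--
-- def map_into_zones(text, delimiter):
--     n = len(text)
--     m = len(delimiter)
--     # overlapping occurrence positions of the delimiter, via C-level str.find
--     matches = []
--     i = text.find(delimiter)
--     while i != -1:
--         matches.append(i)
--         i = text.find(delimiter, i + 1)
--     # fold the match positions into delimiter-zone intervals [a, b)
--     zones = []
--     start = None
--     end = None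
--     for q in matches:
--         if start is None:
--             start = q
--         elif end is None:
--             end = q + m
--         elif q < end:
--             end = q + m
--         else:
--             zones.append((start, end))
--             start, end = q, None
--     if start is not None:
--         zones.append((start, n if end is None else end))
--     # paint the label sequence from the intervals
--     labels = []
--     pos = 0
--     for a, b in zones:
--         labels += [0] * (a - pos) + [1] * (b - a)
--         pos = b
--     labels += [0] * (n - pos)
--     return list(zip(text, labels))
-- ===== Notes on version B (the rewrite author's own statement) =====
-- stated objective: faster
-- what changed: Instead of slicing and comparing the delimiter at every character inside a per-character state machine, B first collects all (overlapping) delimiter occurrence positions with C-level str.find, folds those positions into delimiter-zone intervals, and paints the label sequence from the intervals.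
-- outside the precondition, e.g. on map_into_zones('ab', ''): A returns [('a', 1), ('b', 1)], B returns [('a', 1), ('b', 0)]
import Mathlib
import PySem

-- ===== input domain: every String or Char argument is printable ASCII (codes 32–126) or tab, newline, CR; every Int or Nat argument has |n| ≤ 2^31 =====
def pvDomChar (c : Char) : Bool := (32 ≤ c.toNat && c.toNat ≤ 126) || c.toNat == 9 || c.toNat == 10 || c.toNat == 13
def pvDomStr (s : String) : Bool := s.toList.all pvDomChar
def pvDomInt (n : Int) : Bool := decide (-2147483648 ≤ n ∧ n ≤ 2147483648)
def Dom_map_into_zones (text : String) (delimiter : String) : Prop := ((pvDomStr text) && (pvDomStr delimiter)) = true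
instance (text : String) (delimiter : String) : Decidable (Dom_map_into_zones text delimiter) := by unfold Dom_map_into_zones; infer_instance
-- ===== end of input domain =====

-- B replaces A's per-character slice-and-compare state machine by: collect all delimiter
-- occurrence positions (str.find loop), fold them into delimiter-zone intervals, paint labels.

-- ===== PORT A =====
def map_into_zones (text : String) (delimiter : String) : List (String × Int) :=
  let t := text.toList
  let d := delimiter.toList
  let r := (PySem.List.enumerate t 0).foldl
    (fun (st : List (String × Int) × Int × Bool) (p : Int × Char) =>
      let chunk := PySem.List.slice t (some p.1) (some (p.1 + (d.length : Int)))
      -- if delim_zone_buffer > 0: decrement, and leave the zone when it hits 0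
      let p1 : Int × Bool :=
        if st.2.1 > 0 then
          let b := st.2.1 - 1
          (b, if b = 0 then false else st.2.2)
        else st.2
      let p2 : Int × Bool :=
        if chunk = d ∧ p1.2 = true then ((d.length : Int), p1.2)
        else if chunk = d ∧ p1.2 = false then (p1.1, true)
        else p1
      if p2.2 = true ∨ p2.1 > 0 then (st.1 ++ [(String.ofList [p.2], (1 : Int))], p2)
      else (st.1 ++ [(String.ofList [p.2], (0 : Int))], p2))
    ([], (0 : Int), false)
  r.1

-- ===== PORT B =====
-- the `while i != -1: matches.append(i); i = text.find(delimiter, i+1)` loop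
-- (fuel n+2 only makes the recursion structural; find positions strictly increase,
--  so the fuel is never exhausted before find returns -1)
def mzFindAll (t d : List Char) : Nat → Int → List Nat
  | 0, _ => []
  | fuel + 1, i =>
    if i = -1 then []
    else i.toNat :: mzFindAll t d fuel (PySem.Chars.findFrom t d ((i.toNat + 1 : Nat) : Int) none)

def map_into_zones_alt (text : String) (delimiter : String) : List (String × Int) :=
  let t := text.toList
  let d := delimiter.toList
  let n := t.length
  let m := d.length
  let ms := mzFindAll t d (n + 2) (PySem.Chars.find t d)
  -- fold the match positions into delimiter-zone intervals
  let z := ms.foldl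
    (fun (st : List (Nat × Nat) × Option Nat × Option Nat) q =>
      match st.2.1 with
      | none => (st.1, some q, none)
      | some s =>
        match st.2.2 with
        | none => (st.1, some s, some (q + m))
        | some e => if q < e then (st.1, some s, some (q + m)) else (st.1 ++ [(s, e)], some q, none))
    ([], none, none)
  let zones := match z.2.1 with
    | none => z.1
    | some s => z.1 ++ [(s, match z.2.2 with | none => n | some e => e)]
  -- paint the label sequence from the intervals
  let pr := zones.foldl
    (fun (st : List Int × Nat) (ab : Nat × Nat) =>
      (st.1 ++ List.replicate (ab.1 - st.2) (0 : Int) ++ List.replicate (ab.2 - ab.1) (1 : Int), ab.2))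
    ([], 0)
  let labels := pr.1 ++ List.replicate (n - pr.2) (0 : Int)
  (t.zip labels).map (fun p => (String.ofList [p.1], p.2))

-- ===== PRECONDITION & SPEC =====
-- Pre_ excludes only the empty delimiter, on which '' matches at every index and A's
-- all-delimiter-zone output is an accidental corner that B labels differently.
def Pre_map_into_zones (text : String) (delimiter : String) : Prop := delimiter ≠ ""
instance (text : String) (delimiter : String) : Decidable (Pre_map_into_zones text delimiter) := by
  unfold Pre_map_into_zones; infer_instance

def pvWitness_map_into_zones : String × String := ("ab*cd*e", "*")

def Spec_map_into_zones (text : String) (delimiter : String) (out : List (String × Int)) : Prop := out = map_into_zones_alt text delimiter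
instance (text : String) (delimiter : String) (out : List (String × Int)) : Decidable (Spec_map_into_zones text delimiter out) := by unfold Spec_map_into_zones; infer_instance

-- ===== CLAIM (what is proved, stated in full; the proofs are below) =====
def Claim_equal_map_into_zones : Prop := ∀ (text : String) (delimiter : String), Dom_map_into_zones text delimiter → Pre_map_into_zones text delimiter → Spec_map_into_zones text delimiter (map_into_zones text delimiter)

-- ===== LEMMAS AND PROOFS =====

-- the list of delimiter-match positions in [k, n)
def mlist (t d : List Char) (k : Nat) : List Nat :=
  (List.range' k (t.length - k)).filter (fun j => decide (d <+: t.drop j))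

-- abstract state of A's character machine
inductive MZS where
  | closed : MZS
  | opn : MZS
  | closing : Nat → MZS
deriving DecidableEq

-- reference label sequence for positions i, i+1, …, i+fuel-1
def mspec (t d : List Char) : Nat → Nat → MZS → List Int
  | 0, _, _ => []
  | fuel + 1, i, st =>
    let st1 := match st with
      | .closing e => if e ≤ i then .closed else .closing e
      | s => s
    let st2 := if d <+: t.drop i then
        (match st1 with | .closed => MZS.opn | _ => .closing (i + d.length))
      else st1
    (if st2 = .closed then (0 : Int) else 1) :: mspec t d fuel (i + 1) st2

-- recursive form of B's zone-building fold (plus finalization)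
def mzfold (n m : Nat) : List Nat → Option (Nat × Option Nat) → List (Nat × Nat)
  | [], none => []
  | [], some (s, e?) => [(s, e?.getD n)]
  | q :: M, none => mzfold n m M (some (q, none))
  | q :: M, some (s, none) => mzfold n m M (some (s, some (q + m)))
  | q :: M, some (s, some e) =>
    if q < e then mzfold n m M (some (s, some (q + m))) else (s, e) :: mzfold n m M (some (q, none))

-- recursive form of B's painting fold
def mrender (n : Nat) : Nat → List (Nat × Nat) → List Int
  | pos, [] => List.replicate (n - pos) 0
  | pos, (a, b) :: zs => List.replicate (a - pos) (0 : Int) ++ List.replicate (b - a) (1 : Int) ++ mrender n b zs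

-- correspondence between A's (buffer, in_zone) and the abstract state at position k
def mcorr (buf : Int) (inz : Bool) (st : MZS) (k : Nat) : Prop :=
  match st with
  | .closed => buf = 0 ∧ inz = false
  | .opn => buf = 0 ∧ inz = true
  | .closing e => k ≤ e ∧ buf = (e : Int) - k + 1 ∧ inz = true

theorem mlist_ge (t d : List Char) (k : Nat) : ∀ q ∈ mlist t d k, k ≤ q ∧ d <+: t.drop q := by
  intro q hq
  unfold mlist at hq
  simp only [List.mem_filter, List.mem_range', decide_eq_true_eq] at hq
  obtain ⟨⟨i, hi, rfl⟩, h2⟩ := hq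
  exact ⟨by omega, h2⟩

theorem mlist_step (t d : List Char) (k : Nat) (hk : k < t.length) :
    mlist t d k = if d <+: t.drop k then k :: mlist t d (k + 1) else mlist t d (k + 1) := by
  unfold mlist
  have h1 : t.length - k = (t.length - (k + 1)) + 1 := by omega
  rw [h1, List.range'_succ, List.filter_cons]
  by_cases h : d <+: t.drop k <;> simp [h]

theorem mlist_end (t d : List Char) (k : Nat) (hk : t.length ≤ k) : mlist t d k = [] := by
  unfold mlist
  have h1 : t.length - k = 0 := by omega
  rw [h1]
  rfl

theorem match_le (t d : List Char) (j : Nat) (h : d <+: t.drop j) : j + d.length ≤ t.length ∨ t.length ≤ j := by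
  have := h.length_le
  rw [List.length_drop] at this
  omega

theorem mlist_congr (t d : List Char) (k : Nat) :
    ∀ j, k ≤ j → j ≤ t.length → (∀ i, k ≤ i → i < j → ¬ d <+: t.drop i) →
      mlist t d k = mlist t d j := by
  intro j hkj
  induction j, hkj using Nat.le_induction with
  | base => intro _ _; rfl
  | succ j hkj ih =>
    intro hj hno
    rw [ih (by omega) (fun i h1 h2 => hno i h1 (by omega)), mlist_step t d j (by omega),
      if_neg (hno j hkj (by omega))]

theorem prefix_drop_infix (t d : List Char) (k j : Nat) (hkj : k ≤ j) (h : d <+: t.drop j) :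
    d <:+: t.drop k := by
  have h2 : t.drop j = (t.drop k).drop (j - k) := by
    rw [List.drop_drop]
    congr 1
    omega
  rw [h2] at h
  exact h.isInfix.trans (List.drop_suffix _ _).isInfix

-- L3: the find loop computes exactly the match positions (nonempty delimiter)
theorem mzFindAll_eq (t d : List Char) (hd : d ≠ []) :
    ∀ fuel k, k ≤ t.length → t.length + 1 - k ≤ fuel →
      mzFindAll t d fuel (PySem.Chars.findFrom t d (k : Int) none) = mlist t d k := by
  intro fuel
  induction fuel with
  | zero => intro k hk hf; omega
  | succ fuel ih =>
    intro k hk hf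
    by_cases hr : PySem.Chars.findFrom t d (k : Int) none = -1
    · rw [hr]
      unfold mzFindAll
      rw [if_pos rfl]
      have hni : ¬ d <:+: t.drop k := (PySem.Chars.findFrom_natCast_eq_neg_one_iff t d k hk).mp hr
      refine (List.eq_nil_iff_forall_not_mem.mpr (fun q hq => ?_)).symm
      obtain ⟨h1, h2⟩ := mlist_ge t d k q hq
      exact hni (prefix_drop_infix t d k q h1 h2)
    · obtain ⟨h1, h2, h3⟩ := PySem.Chars.findFrom_natCast_spec t d k hk hr
      set r := PySem.Chars.findFrom t d (k : Int) none with hrdef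
      have hr0 : 0 ≤ r := le_trans (by exact_mod_cast Int.natCast_nonneg k) h1
      have hkj : k ≤ r.toNat := by omega
      have hjn : r.toNat + d.length ≤ t.length := by
        rcases match_le t d r.toNat h2 with h | h
        · exact h
        · exfalso
          rw [List.drop_eq_nil_of_le h] at h2
          exact hd (List.prefix_nil.mp h2)
      have hdl : 1 ≤ d.length := by
        cases d with
        | nil => exact absurd rfl hd
        | cons a l => simp
      unfold mzFindAll
      rw [if_neg hr]
      rw [ih (r.toNat + 1) (by omega) (by omega)]
      rw [mlist_congr t d k r.toNat hkj (by omega) (fun i hik hir => h3 i hik hir),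
        mlist_step t d r.toNat (by omega), if_pos h2]

-- L4: a pending zone's rendered output depends on its start only through the head pair
theorem mzfold_pending (n m : Nat) (hm : 1 ≤ m) :
    ∀ (M : List Nat) (x : Option Nat) (c : Nat), (∀ q ∈ M, c ≤ q) → (∀ e, x = some e → c ≤ e) →
      c ≤ n →
      ∃ b rest, c ≤ b ∧ ∀ s', mzfold n m M (some (s', x)) = (s', b) :: rest := by
  intro M
  induction M with
  | nil =>
    intro x c _ hx hc
    cases x with
    | none => exact ⟨n, [], hc, fun s' => rfl⟩
    | some e => exact ⟨e, [], hx e rfl, fun s' => rfl⟩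
  | cons q M ih =>
    intro x c hM hx hc
    have hq : c ≤ q := hM q (by simp)
    cases x with
    | none =>
      obtain ⟨b, rest, hb, hall⟩ := ih (some (q + m)) c (fun r hr => hM r (by simp [hr]))
        (by intro e he; injection he with he; omega) hc
      exact ⟨b, rest, hb, fun s' => hall s'⟩
    | some e =>
      by_cases hqe : q < e
      · obtain ⟨b, rest, hb, hall⟩ := ih (some (q + m)) c (fun r hr => hM r (by simp [hr]))
          (by intro e' he'; injection he' with he'; omega) hc
        refine ⟨b, rest, hb, fun s' => ?_⟩
        unfold mzfold
        rw [if_pos hqe]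
        exact hall s'
      · refine ⟨e, mzfold n m M (some (q, none)), hx e rfl, fun s' => ?_⟩
        conv_lhs => unfold mzfold
        rw [if_neg hqe]

-- L5: flushing a finished pending zone
theorem mzfold_flush (n m : Nat) (s e : Nat) :
    ∀ M : List Nat, (∀ q ∈ M, e ≤ q) →
      mzfold n m M (some (s, some e)) = (s, e) :: mzfold n m M none := by
  intro M
  induction M with
  | nil => intro _; rfl
  | cons q M ih =>
    intro hM
    have hq : e ≤ q := hM q (by simp)
    unfold mzfold
    rw [if_neg (by omega)]

-- L6: one-position peeling of mrender
theorem mrender_nil_cons (n k : Nat) (hk : k < n) :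
    mrender n k [] = 0 :: mrender n (k + 1) [] := by
  unfold mrender
  have h1 : n - k = (n - (k + 1)) + 1 := by omega
  rw [h1, List.replicate_succ]

theorem mrender_zero_cons (n k a b : Nat) (zs : List (Nat × Nat)) (h : k < a) :
    mrender n k ((a, b) :: zs) = 0 :: mrender n (k + 1) ((a, b) :: zs) := by
  unfold mrender
  have h1 : a - k = (a - (k + 1)) + 1 := by omega
  rw [h1, List.replicate_succ]
  simp

theorem mrender_one_cons (n k b : Nat) (zs : List (Nat × Nat)) (h : k < b) :
    mrender n k ((k, b) :: zs) = 1 :: mrender n (k + 1) ((k + 1, b) :: zs) := by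
  unfold mrender
  have h1 : b - k = (b - (k + 1)) + 1 := by omega
  rw [h1, List.replicate_succ]
  simp

theorem mrender_skip (n k : Nat) (zs : List (Nat × Nat)) :
    mrender n k ((k, k) :: zs) = mrender n k zs := by
  conv_lhs => unfold mrender
  simp

theorem mzfold_cons_lt (n m q e s : Nat) (M : List Nat) (h : q < e) :
    mzfold n m (q :: M) (some (s, some e)) = mzfold n m M (some (s, some (q + m))) := by
  conv_lhs => unfold mzfold
  simp only [if_pos h]

-- specGo from a flushed closing state equals specGo from closed
theorem mspec_closing_flush (t d : List Char) (fuel i e : Nat) (h : e ≤ i) :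
    mspec t d fuel i (.closing e) = mspec t d fuel i .closed := by
  cases fuel with
  | zero => rfl
  | succ f =>
    show mspec t d (f + 1) i (.closing e) = mspec t d (f + 1) i .closed
    unfold mspec
    simp only [if_pos h]

-- KL: rendering the zones built from the remaining matches equals the reference labels
theorem mz_main (t d : List Char) (hd : d ≠ []) :
    ∀ fuel k, fuel = t.length - k → k ≤ t.length →
      (mrender t.length k (mzfold t.length d.length (mlist t d k) none)
        = mspec t d (t.length - k) k .closed)
      ∧ (mrender t.length k (mzfold t.length d.length (mlist t d k) (some (k, none)))
        = mspec t d (t.length - k) k .opn)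
      ∧ (∀ e, k ≤ e → e ≤ t.length →
          mrender t.length k (mzfold t.length d.length (mlist t d k) (some (k, some e)))
            = mspec t d (t.length - k) k (.closing e)) := by
  have hm : 1 ≤ d.length := by
    cases d with
    | nil => exact absurd rfl hd
    | cons a l => simp
  intro fuel
  induction fuel with
  | zero =>
    intro k h1 h2
    have hk : k = t.length := by omega
    subst hk
    rw [mlist_end t d t.length (le_refl _)]
    refine ⟨by simp [mzfold, mrender, mspec], by simp [mzfold, mrender, mspec], ?_⟩
    intro e he1 he2
    have he : e = t.length := by omega
    subst he
    simp [mzfold, mrender, mspec]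
  | succ fuel ih =>
    intro k h1 h2
    have hkn : k < t.length := by omega
    obtain ⟨ihA, ihB, ihC⟩ := ih (k + 1) (by omega) (by omega)
    have hfu : t.length - (k + 1) = fuel := by omega
    rw [hfu] at ihA ihB ihC
    have hnk : t.length - k = fuel + 1 := by omega
    have hpend : ∀ (M : List Nat) (x : Option Nat), (∀ q ∈ M, k + 1 ≤ q) →
        (∀ e', x = some e' → k + 1 ≤ e') →
        ∃ b rest, k + 1 ≤ b ∧ ∀ s', mzfold t.length d.length M (some (s', x)) = (s', b) :: rest :=
      fun M x hM hx => mzfold_pending t.length d.length hm M x (k + 1) hM hx (by omega)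
    have htail : ∀ q ∈ mlist t d (k + 1), k + 1 ≤ q := fun q hq => (mlist_ge t d (k + 1) q hq).1
    by_cases hP : d <+: t.drop k
    case pos =>
      have hkm : k + d.length ≤ t.length := by
        rcases match_le t d k hP with h | h
        · exact h
        · omega
      have hstep : mlist t d k = k :: mlist t d (k + 1) := by
        rw [mlist_step t d k hkn, if_pos hP]
      have hA : mrender t.length k (mzfold t.length d.length (mlist t d k) none)
          = mspec t d (t.length - k) k .closed := by
        rw [hstep]
        show mrender t.length k (mzfold t.length d.length (mlist t d (k + 1)) (some (k, none))) = _
        obtain ⟨b, rest, hb, hall⟩ := hpend (mlist t d (k + 1)) none htail (by intro e' h; cases h)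
        rw [hall k, mrender_one_cons _ _ _ _ (by omega), ← hall (k + 1), ihB, hnk]
        simp [mspec, hP]
      refine ⟨hA, ?_, ?_⟩
      · rw [hstep]
        show mrender t.length k (mzfold t.length d.length (mlist t d (k + 1)) (some (k, some (k + d.length)))) = _
        obtain ⟨b, rest, hb, hall⟩ := hpend (mlist t d (k + 1)) (some (k + d.length)) htail
          (by intro e' h; injection h with h; omega)
        rw [hall k, mrender_one_cons _ _ _ _ (by omega), ← hall (k + 1),
          ihC (k + d.length) (by omega) hkm, hnk]
        simp [mspec, hP]
      · intro e hke hen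
        by_cases hek : e = k
        · subst hek
          rw [mzfold_flush _ _ _ _ _ (fun q hq => (mlist_ge t d e q hq).1), mrender_skip, hA,
            mspec_closing_flush _ _ _ _ _ (le_refl e)]
        · have hke' : k < e := by omega
          rw [hstep, mzfold_cons_lt _ _ _ _ _ _ hke']
          obtain ⟨b, rest, hb, hall⟩ := hpend (mlist t d (k + 1)) (some (k + d.length)) htail
            (by intro e' h; injection h with h; omega)
          rw [hall k, mrender_one_cons _ _ _ _ (by omega), ← hall (k + 1),
            ihC (k + d.length) (by omega) hkm, hnk]
          simp [mspec, hP, if_neg (by omega : ¬ e ≤ k)]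
    case neg =>
      have hstep : mlist t d k = mlist t d (k + 1) := by
        rw [mlist_step t d k hkn, if_neg hP]
      have hA : mrender t.length k (mzfold t.length d.length (mlist t d k) none)
          = mspec t d (t.length - k) k .closed := by
        rw [hstep]
        cases hm2 : mlist t d (k + 1) with
        | nil =>
          show mrender t.length k [] = _
          rw [mrender_nil_cons _ _ hkn]
          have hz : mzfold t.length d.length (mlist t d (k + 1)) none = [] := by rw [hm2]; rfl
          have hz2 : mrender t.length (k + 1) ([] : List (Nat × Nat)) =
              mrender t.length (k + 1) (mzfold t.length d.length (mlist t d (k + 1)) none) := by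
            rw [hz]
          rw [hz2, ihA, hnk]
          simp [mspec, hP]
        | cons q M =>
          have hq1 : k + 1 ≤ q := htail q (by rw [hm2]; simp)
          show mrender t.length k (mzfold t.length d.length M (some (q, none))) = _
          obtain ⟨b, rest, hb, hall⟩ := hpend M none
            (fun r hr => htail r (by rw [hm2]; simp [hr])) (by intro e' h; cases h)
          rw [hall q, mrender_zero_cons _ _ _ _ _ (by omega), ← hall q]
          have hz : mzfold t.length d.length (mlist t d (k + 1)) none
              = mzfold t.length d.length M (some (q, none)) := by rw [hm2]; rfl
          rw [← hz, ihA, hnk]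
          simp [mspec, hP]
      refine ⟨hA, ?_, ?_⟩
      · rw [hstep]
        obtain ⟨b, rest, hb, hall⟩ := hpend (mlist t d (k + 1)) none htail (by intro e' h; cases h)
        rw [hall k, mrender_one_cons _ _ _ _ (by omega), ← hall (k + 1), ihB, hnk]
        simp [mspec, hP]
      · intro e hke hen
        by_cases hek : e = k
        · subst hek
          rw [mzfold_flush _ _ _ _ _ (fun q hq => (mlist_ge t d e q hq).1), mrender_skip, hA,
            mspec_closing_flush _ _ _ _ _ (le_refl e)]
        · have hke' : k < e := by omega
          rw [hstep]
          obtain ⟨b, rest, hb, hall⟩ := hpend (mlist t d (k + 1)) (some e) htail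
            (by intro e' h; injection h with h; omega)
          rw [hall k, mrender_one_cons _ _ _ _ (by omega), ← hall (k + 1),
            ihC e (by omega) hen, hnk]
          simp [mspec, hP, if_neg (by omega : ¬ e ≤ k)]

-- AL: A's fold from a corresponding state produces the reference labels
-- astep is definitionally A's loop body (same lambda, named for the proofs)
def astep (t d : List Char) (s : List (String × Int) × Int × Bool) (p : Int × Char) :
    List (String × Int) × Int × Bool :=
  let chunk := PySem.List.slice t (some p.1) (some (p.1 + (d.length : Int)))
  let p1 : Int × Bool :=
    if s.2.1 > 0 then
      let b := s.2.1 - 1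
      (b, if b = 0 then false else s.2.2)
    else s.2
  let p2 : Int × Bool :=
    if chunk = d ∧ p1.2 = true then ((d.length : Int), p1.2)
    else if chunk = d ∧ p1.2 = false then (p1.1, true)
    else p1
  if p2.2 = true ∨ p2.1 > 0 then (s.1 ++ [(String.ofList [p.2], (1 : Int))], p2)
  else (s.1 ++ [(String.ofList [p.2], (0 : Int))], p2)

theorem ma_main (t d : List Char) (hd : d ≠ []) :
    ∀ fuel k, fuel = t.length - k → k ≤ t.length →
      ∀ (acc : List (String × Int)) (buf : Int) (inz : Bool) (st : MZS), mcorr buf inz st k →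
        ((PySem.List.enumerate (t.drop k) (k : Int)).foldl (astep t d) (acc, buf, inz)).1
        = acc ++ ((t.drop k).zip (mspec t d (t.length - k) k st)).map
            (fun p => (String.ofList [p.1], p.2)) := by
  have hm : 1 ≤ d.length := by
    cases d with
    | nil => exact absurd rfl hd
    | cons a l => simp
  intro fuel
  induction fuel with
  | zero =>
    intro k h1 h2 acc buf inz st hc
    have hk : t.drop k = [] := List.drop_eq_nil_of_le (by omega)
    rw [hk]
    simp [PySem.List.enumerate]
  | succ fuel ih =>
    intro k h1 h2 acc buf inz st hc
    have hkn : k < t.length := by omega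
    have hdrop : t.drop k = t[k] :: t.drop (k + 1) := List.drop_eq_getElem_cons hkn
    have hnk : t.length - k = fuel + 1 := by omega
    have hfu : t.length - (k + 1) = fuel := by omega
    have hcast : (k : Int) + 1 = ((k + 1 : Nat) : Int) := by push_cast; ring
    rw [hdrop, PySem.List.enumerate_cons, List.foldl_cons, hcast, hnk]
    have hchunk : PySem.List.slice t (some (k : Int)) (some ((k : Int) + (d.length : Int)))
        = (t.drop k).take d.length := PySem.List.slice_natCast_add t k d.length
    have hIH := fun acc' buf' inz' st' hc' =>
      ih (k + 1) (by omega) (by omega) acc' buf' inz' st' hc'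
    rw [hfu] at hIH
    by_cases hP : d <+: t.drop k
    case pos =>
      have hcd : (t.drop k).take d.length = d := by
        exact (List.prefix_iff_eq_take.mp hP).symm
      have hkm : k + d.length ≤ t.length := by
        rcases match_le t d k hP with h | h
        · exact h
        · omega
      cases st with
      | closed =>
        obtain ⟨hb, hi⟩ := hc
        subst hb; subst hi
        rw [show astep t d (acc, 0, false) ((k : Int), t[k])
            = (acc ++ [(String.ofList [t[k]], 1)], (0 : Int), true) from by
          unfold astep; simp [hchunk, hcd]]
        rw [hIH _ _ _ .opn ⟨rfl, rfl⟩]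
        simp [mspec, hP]; rw [hdrop]; rw [List.zip_cons_cons, List.map_cons]
      | opn =>
        obtain ⟨hb, hi⟩ := hc
        subst hb; subst hi
        rw [show astep t d (acc, 0, true) ((k : Int), t[k])
            = (acc ++ [(String.ofList [t[k]], 1)], (d.length : Int), true) from by
          unfold astep; simp [hchunk, hcd]]
        rw [hIH _ _ _ (.closing (k + d.length)) ⟨by omega, by push_cast; ring, rfl⟩]
        simp [mspec, hP]; rw [hdrop]; rw [List.zip_cons_cons, List.map_cons]
      | closing e =>
        obtain ⟨hke, hb, hi⟩ := hc
        subst hb; subst hi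
        by_cases hek : e = k
        · rw [show astep t d (acc, (e : Int) - (k : Int) + 1, true) ((k : Int), t[k])
              = (acc ++ [(String.ofList [t[k]], 1)], (0 : Int), true) from by
            unfold astep
            simp [hchunk, hcd, show (0 : Int) < (e : Int) - (k : Int) + 1 by omega,
              show ((e : Int) - (k : Int) + 1 - 1 = 0) by omega]]
          rw [hIH _ _ _ .opn ⟨rfl, rfl⟩]
          simp [mspec, hP, if_pos (by omega : e ≤ k)]; rw [hdrop]; rw [List.zip_cons_cons, List.map_cons]
        · have hlt : k < e := by omega
          rw [show astep t d (acc, (e : Int) - (k : Int) + 1, true) ((k : Int), t[k])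
              = (acc ++ [(String.ofList [t[k]], 1)], (d.length : Int), true) from by
            unfold astep
            simp [hchunk, hcd, show (0 : Int) < (e : Int) - (k : Int) + 1 by omega,
              show ¬ ((e : Int) - (k : Int) = 0) by omega]]
          rw [hIH _ _ _ (.closing (k + d.length)) ⟨by omega, by push_cast; ring, rfl⟩]
          simp [mspec, hP, if_neg (by omega : ¬ e ≤ k)]; rw [hdrop]; rw [List.zip_cons_cons, List.map_cons]
    case neg =>
      have hcd : ¬ (t.drop k).take d.length = d := by
        intro h
        exact hP (h ▸ List.take_prefix d.length (t.drop k))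
      cases st with
      | closed =>
        obtain ⟨hb, hi⟩ := hc
        subst hb; subst hi
        rw [show astep t d (acc, 0, false) ((k : Int), t[k])
            = (acc ++ [(String.ofList [t[k]], 0)], (0 : Int), false) from by
          unfold astep; simp [hchunk, hcd]]
        rw [hIH _ _ _ .closed ⟨rfl, rfl⟩]
        simp [mspec, hP]; rw [hdrop]; rw [List.zip_cons_cons, List.map_cons]
      | opn =>
        obtain ⟨hb, hi⟩ := hc
        subst hb; subst hi
        rw [show astep t d (acc, 0, true) ((k : Int), t[k])
            = (acc ++ [(String.ofList [t[k]], 1)], (0 : Int), true) from by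
          unfold astep; simp [hchunk, hcd]]
        rw [hIH _ _ _ .opn ⟨rfl, rfl⟩]
        simp [mspec, hP]; rw [hdrop]; rw [List.zip_cons_cons, List.map_cons]
      | closing e =>
        obtain ⟨hke, hb, hi⟩ := hc
        subst hb; subst hi
        by_cases hek : e = k
        · rw [show astep t d (acc, (e : Int) - (k : Int) + 1, true) ((k : Int), t[k])
              = (acc ++ [(String.ofList [t[k]], 0)], (0 : Int), false) from by
            unfold astep
            simp [hchunk, hcd, show (0 : Int) < (e : Int) - (k : Int) + 1 by omega,
              show ((e : Int) - (k : Int) + 1 - 1 = 0) by omega]]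
          rw [hIH _ _ _ .closed ⟨rfl, rfl⟩]
          simp [mspec, hP, if_pos (by omega : e ≤ k)]; rw [hdrop]; rw [List.zip_cons_cons, List.map_cons]
        · have hlt : k < e := by omega
          rw [show astep t d (acc, (e : Int) - (k : Int) + 1, true) ((k : Int), t[k])
              = (acc ++ [(String.ofList [t[k]], 1)], (e : Int) - (k : Int), true) from by
            unfold astep
            simp [hchunk, hcd, show (0 : Int) < (e : Int) - (k : Int) + 1 by omega,
              show ¬ ((e : Int) - (k : Int) = 0) by omega]]
          rw [hIH _ _ _ (.closing e) ⟨by omega, by push_cast; omega, rfl⟩]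
          simp [mspec, hP, if_neg (by omega : ¬ e ≤ k)]; rw [hdrop]; rw [List.zip_cons_cons, List.map_cons]

-- B's folds equal their recursive forms
theorem paint_eq (n : Nat) :
    ∀ (zs : List (Nat × Nat)) (acc : List Int) (pos : Nat),
      (zs.foldl
        (fun (st : List Int × Nat) (ab : Nat × Nat) =>
          (st.1 ++ List.replicate (ab.1 - st.2) (0 : Int) ++ List.replicate (ab.2 - ab.1) (1 : Int), ab.2))
        (acc, pos)).1
      ++ List.replicate (n - (zs.foldl
        (fun (st : List Int × Nat) (ab : Nat × Nat) =>
          (st.1 ++ List.replicate (ab.1 - st.2) (0 : Int) ++ List.replicate (ab.2 - ab.1) (1 : Int), ab.2))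
        (acc, pos)).2) (0 : Int)
      = acc ++ mrender n pos zs := by
  intro zs
  induction zs with
  | nil => intro acc pos; simp [mrender]
  | cons ab zs ih =>
    intro acc pos
    obtain ⟨a, b⟩ := ab
    simp only [List.foldl_cons]
    rw [ih]
    conv_rhs => unfold mrender
    simp

theorem zones_eq (n m : Nat) :
    ∀ (M : List Nat) (zs : List (Nat × Nat)) (s? : Option Nat) (e? : Option Nat),
      (match (M.foldl
        (fun (st : List (Nat × Nat) × Option Nat × Option Nat) q =>
          match st.2.1 with
          | none => (st.1, some q, none)
          | some s =>
            match st.2.2 with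
            | none => (st.1, some s, some (q + m))
            | some e => if q < e then (st.1, some s, some (q + m)) else (st.1 ++ [(s, e)], some q, none))
        (zs, s?, e?)).2.1 with
       | none => (M.foldl
        (fun (st : List (Nat × Nat) × Option Nat × Option Nat) q =>
          match st.2.1 with
          | none => (st.1, some q, none)
          | some s =>
            match st.2.2 with
            | none => (st.1, some s, some (q + m))
            | some e => if q < e then (st.1, some s, some (q + m)) else (st.1 ++ [(s, e)], some q, none))
        (zs, s?, e?)).1
       | some s => (M.foldl
        (fun (st : List (Nat × Nat) × Option Nat × Option Nat) q =>
          match st.2.1 with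
          | none => (st.1, some q, none)
          | some s =>
            match st.2.2 with
            | none => (st.1, some s, some (q + m))
            | some e => if q < e then (st.1, some s, some (q + m)) else (st.1 ++ [(s, e)], some q, none))
        (zs, s?, e?)).1 ++ [(s, match (M.foldl
        (fun (st : List (Nat × Nat) × Option Nat × Option Nat) q =>
          match st.2.1 with
          | none => (st.1, some q, none)
          | some s =>
            match st.2.2 with
            | none => (st.1, some s, some (q + m))
            | some e => if q < e then (st.1, some s, some (q + m)) else (st.1 ++ [(s, e)], some q, none))
        (zs, s?, e?)).2.2 with | none => n | some e => e)])
      = zs ++ mzfold n m M (match s? with | none => none | some s => some (s, e?)) := by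
  intro M
  induction M with
  | nil =>
    intro zs s? e?
    cases s? with
    | none => simp [mzfold]
    | some s => cases e? <;> simp [mzfold, Option.getD]
  | cons q M ih =>
    intro zs s? e?
    cases s? with
    | none =>
      simp only [List.foldl_cons]
      conv_rhs => unfold mzfold
      simpa using ih zs (some q) none
    | some s =>
      cases e? with
      | none =>
        simp only [List.foldl_cons]
        conv_rhs => unfold mzfold
        simpa using ih zs (some s) (some (q + m))
      | some e =>
        simp only [List.foldl_cons]
        by_cases hqe : q < e
        · conv_rhs => unfold mzfold
          simp only [if_pos hqe]
          simpa using ih zs (some s) (some (q + m))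
        · rw [if_neg hqe]
          have h2 := ih (zs ++ [(s, e)]) (some q) none
          simp only [List.append_assoc] at h2
          rw [h2]
          conv_rhs => unfold mzfold
          rw [if_neg hqe]
          simp

-- ===== VERDICT (by name: the statement is the Claim_ definition above) =====
theorem map_into_zones_spec : Claim_equal_map_into_zones := by
  intro text delimiter _ hpre
  show map_into_zones text delimiter = map_into_zones_alt text delimiter
  have hd : delimiter.toList ≠ [] := by
    intro h
    apply hpre
    have := congrArg String.ofList h
    simpa using this
  have hms : mzFindAll text.toList delimiter.toList (text.toList.length + 2)
      (PySem.Chars.find text.toList delimiter.toList) = mlist text.toList delimiter.toList 0 := by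
    have h0 := mzFindAll_eq text.toList delimiter.toList hd (text.toList.length + 2) 0
      (Nat.zero_le _) (by omega)
    simpa using h0
  have hA := ma_main text.toList delimiter.toList hd text.toList.length 0 (by omega)
    (Nat.zero_le _) [] 0 false .closed ⟨rfl, rfl⟩
  simp only [List.drop_zero, Nat.sub_zero, List.nil_append, Nat.cast_zero] at hA
  have hKL := (mz_main text.toList delimiter.toList hd text.toList.length 0 (by omega)
    (Nat.zero_le _)).1
  simp only [Nat.sub_zero] at hKL
  show ((PySem.List.enumerate text.toList 0).foldl
      (astep text.toList delimiter.toList) ([], 0, false)).1 = map_into_zones_alt text delimiter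
  rw [hA, hKL.symm]
  simp only [map_into_zones_alt]
  rw [hms, zones_eq, paint_eq]
  simp
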